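-- pv_equiv track=rewrite | github.com/texttechnologylab/duui-uima-reader | duui-annis-reader/src/annis_utils/annis_extract.py | add_whitespace_split
-- ===== SOURCE A (Python) =====
-- from typing import List, Tuple, Any, Union, Optional, Dict
--
-- def add_whitespace_split(text: str) -> List[str]:
--     splitter = [
--         ",", ".", ":", ";", "?", ")", "(", "-", "!",  # Your original list
--         "[", "]", "{", "}", "<", ">", "/", "'",  # Brackets, slashes, quotes
--         "@", "#", "$", "%", "&", "*", "=", "+", "_",  # Symbols used in various contexts
--         "§", "µ", "€", "£", "¥", "°", "±", "©", "®", "™",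
--         "«", "»", "„", "“", "”", "‚", "‘", "’", "〝", "〞",  # Currency and typographic symbols
--     ]
--
--     for char in splitter:
--         text = text.replace(char, f" {char} ")
--
--     return [t for t in text.split(" ") if t != ""]
-- ===== SOURCE B (Python) =====
-- def add_whitespace_split(text):
--     splitters = {
--         ",", ".", ":", ";", "?", ")", "(", "-", "!",
--         "[", "]", "{", "}", "<", ">", "/", "'",
--         "@", "#", "$", "%", "&", "*", "=", "+", "_",
--         "§", "µ", "€", "£", "¥", "°", "±", "©", "®", "™",
--         "«", "»", "„", "“", "”", "‚", "‘", "’", "〝", "〞",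
--     }
--     out = []
--     buf = []
--     for ch in text:
--         if ch in splitters:
--             if buf:
--                 out.append("".join(buf))
--                 buf = []
--             out.append(ch)
--         elif ch == " ":
--             if buf:
--                 out.append("".join(buf))
--                 buf = []
--         else:
--             buf.append(ch)
--     if buf:
--         out.append("".join(buf))
--     return out
-- ===== Notes on version B (the rewrite author's own statement) =====
-- stated objective: alternative
-- what changed: replaced 46 whole-string replace passes plus a final split/filter by a single left-to-right scan with a token buffer that flushes on space and emits splitter characters as standalone tokens
import Mathlib
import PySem

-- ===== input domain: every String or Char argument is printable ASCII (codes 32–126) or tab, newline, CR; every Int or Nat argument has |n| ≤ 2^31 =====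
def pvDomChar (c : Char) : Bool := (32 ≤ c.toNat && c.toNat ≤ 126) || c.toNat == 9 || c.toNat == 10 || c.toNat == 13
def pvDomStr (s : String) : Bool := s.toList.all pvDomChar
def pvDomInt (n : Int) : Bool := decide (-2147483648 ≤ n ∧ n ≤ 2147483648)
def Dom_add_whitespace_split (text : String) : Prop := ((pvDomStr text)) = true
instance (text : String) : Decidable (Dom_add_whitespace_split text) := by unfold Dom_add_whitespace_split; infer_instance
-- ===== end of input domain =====

-- B replaces A's 46 whole-string replace passes plus a final split/filter by one
-- left-to-right scan with a token buffer (alternative decomposition, same results).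

-- ===== PORT A =====
def awsSplitter : List String :=
  [",", ".", ":", ";", "?", ")", "(", "-", "!",
   "[", "]", "{", "}", "<", ">", "/", "'",
   "@", "#", "$", "%", "&", "*", "=", "+", "_",
   "§", "µ", "€", "£", "¥", "°", "±", "©", "®", "™",
   "«", "»", "„", "“", "”", "‚", "‘", "’", "〝", "〞"]

def add_whitespace_split (text : String) : List String :=
  let t := awsSplitter.foldl (fun t ch => PySem.Str.replace t ch (" " ++ ch ++ " ")) text
  ((PySem.Str.split? t " ").getD []).filter (fun u => u != "")

-- ===== PORT B =====
def awsSplitChars : List Char :=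
  [',', '.', ':', ';', '?', ')', '(', '-', '!',
   '[', ']', '{', '}', '<', '>', '/', '\'',
   '@', '#', '$', '%', '&', '*', '=', '+', '_',
   '§', 'µ', '€', '£', '¥', '°', '±', '©', '®', '™',
   '«', '»', '„', '“', '”', '‚', '‘', '’', '〝', '〞']

def awsSet : PySem.Set Char := PySem.Set.ofList awsSplitChars

-- one loop step of B: flush the buffer on a splitter or a space, else extend it
def awsStepB (st : List String × List Char) (c : Char) : List String × List Char :=
  if PySem.Set.contains awsSet c then
    ((st.1 ++ (if st.2 ≠ [] then [String.ofList st.2] else [])) ++ [String.ofList [c]], [])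
  else if c = ' ' then
    (st.1 ++ (if st.2 ≠ [] then [String.ofList st.2] else []), [])
  else
    (st.1, st.2 ++ [c])

def add_whitespace_split_alt (text : String) : List String :=
  let st := text.toList.foldl awsStepB ([], [])
  st.1 ++ (if st.2 ≠ [] then [String.ofList st.2] else [])

-- ===== PRECONDITION & SPEC =====
def Spec_add_whitespace_split (text : String) (out : List String) : Prop := out = add_whitespace_split_alt text
instance (text : String) (out : List String) : Decidable (Spec_add_whitespace_split text out) := by unfold Spec_add_whitespace_split; infer_instance

-- ===== CLAIM (what is proved, stated in full; the proofs are below) =====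
def Claim_equal_add_whitespace_split : Prop := ∀ (text : String), Dom_add_whitespace_split text → Spec_add_whitespace_split text (add_whitespace_split text)

-- ===== LEMMAS AND PROOFS =====

-- replacing a single-character pattern acts on each character independently
lemma aws_go_single (d : Char) (r : List Char) :
    ∀ (l : List Char) (fuel : Nat) (acc : List Char), l.length ≤ fuel →
      PySem.Chars.replace.go [d] r fuel l acc
        = acc.reverse ++ l.flatMap (fun x => if x = d then r else [x]) := by
  intro l
  induction l with
  | nil =>
      intro fuel acc _
      cases fuel <;> simp [PySem.Chars.replace.go]
  | cons c t ih =>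
      intro fuel acc h
      cases fuel with
      | zero => simp at h
      | succ f =>
        by_cases hc : c = d
        · subst hc
          simp [PySem.Chars.replace.go, List.isPrefixOf, ih f _ (by simp at h; omega)]
        · simp [PySem.Chars.replace.go, List.isPrefixOf, hc,
                ih f _ (by simp at h; omega), Ne.symm hc]

lemma aws_replace_single (s : List Char) (d : Char) (r : List Char) :
    PySem.Chars.replace s [d] r = s.flatMap (fun x => if x = d then r else [x]) := by
  simpa [PySem.Chars.replace] using aws_go_single d r s s.length [] le_rfl

-- folding the single-character replacements = one simultaneous expansion
lemma aws_foldl_replace :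
    ∀ (pend : List Char), pend.Nodup → ' ' ∉ pend →
      ∀ s : List Char,
        pend.foldl (fun t d => PySem.Chars.replace t [d] [' ', d, ' ']) s
          = s.flatMap (fun x => if x ∈ pend then [' ', x, ' '] else [x]) := by
  intro pend
  induction pend with
  | nil => intro _ _ s; simp
  | cons d rest ih =>
      intro hnd hsp s
      have hdrest : d ∉ rest := (List.nodup_cons.mp hnd).1
      have hndr : rest.Nodup := (List.nodup_cons.mp hnd).2
      have hspr : ' ' ∉ rest := fun h => hsp (List.mem_cons_of_mem _ h)
      have hdsp : d ≠ ' ' := fun h => hsp (h ▸ List.mem_cons_self)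
      simp only [List.foldl_cons]
      rw [ih hndr hspr, aws_replace_single, List.flatMap_assoc]
      refine List.flatMap_congr (fun x _ => ?_)
      by_cases hx : x = d
      · subst hx
        simp [hdrest, hspr]
      · by_cases hxr : x ∈ rest
        · simp [hx, hxr]
        · simp [hx, hxr]

-- Python's split(" ") as a structural recursion
def awsSplitSp : List Char → List Char → List (List Char)
  | [], cur => [cur.reverse]
  | c :: t, cur => if c = ' ' then cur.reverse :: awsSplitSp t [] else awsSplitSp t (c :: cur)

lemma aws_splitOn_go_sp :
    ∀ (l : List Char) (fuel : Nat) (cur : List Char) (acc : List (List Char)), l.length ≤ fuel →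
      PySem.Chars.splitOn.go [' '] fuel l cur acc = acc.reverse ++ awsSplitSp l cur := by
  intro l
  induction l with
  | nil => intro fuel cur acc _; cases fuel <;> simp [PySem.Chars.splitOn.go, awsSplitSp]
  | cons c t ih =>
      intro fuel cur acc h
      cases fuel with
      | zero => simp at h
      | succ f =>
        by_cases hc : c = ' '
        · subst hc
          simp [PySem.Chars.splitOn.go, List.isPrefixOf, awsSplitSp, ih f _ _ (by simp at h; omega)]
        · simp [PySem.Chars.splitOn.go, List.isPrefixOf, hc, Ne.symm hc, awsSplitSp,
                ih f _ _ (by simp at h; omega)]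

lemma aws_splitOn_sp (s : List Char) : PySem.Chars.splitOn s [' '] = awsSplitSp s [] := by
  simpa [PySem.Chars.splitOn] using aws_splitOn_go_sp s (s.length + 1) [] [] (by omega)

-- the token stream both sides produce, char-level
def awsTokC : List Char → List Char → List (List Char)
  | [], buf => if buf ≠ [] then [buf] else []
  | c :: t, buf =>
      if c ∈ awsSplitChars then
        (if buf ≠ [] then [buf] else []) ++ [c] :: awsTokC t []
      else if c = ' ' then
        (if buf ≠ [] then [buf] else []) ++ awsTokC t []
      else
        awsTokC t (buf ++ [c])

lemma aws_space_not_splitter : ' ' ∉ awsSplitChars := by decide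

lemma aws_splitChars_nodup : awsSplitChars.Nodup := by decide

-- A side, char level: split-then-drop-empties of the expansion = the token stream
lemma aws_A_tokens :
    ∀ (s : List Char) (buf : List Char),
      (awsSplitSp (s.flatMap (fun x => if x ∈ awsSplitChars then [' ', x, ' '] else [x]))
          buf.reverse).filter (fun cs => !decide (cs = []))
        = awsTokC s buf := by
  intro s
  induction s with
  | nil =>
      intro buf
      by_cases hb : buf = [] <;> simp [awsSplitSp, awsTokC, hb]
  | cons c t ih =>
      intro buf
      have ht := ih []
      rw [List.reverse_nil] at ht
      by_cases hc : c ∈ awsSplitChars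
      · have hcs : c ≠ ' ' := fun h => aws_space_not_splitter (h ▸ hc)
        by_cases hb : buf = [] <;>
          simp [List.flatMap_cons, hc, awsSplitSp, hcs, awsTokC, hb, ht]
      · by_cases hsp : c = ' '
        · subst hsp
          by_cases hb : buf = [] <;>
            simp [List.flatMap_cons, hc, awsSplitSp, awsTokC, hb, ht]
        · have hrev : c :: buf.reverse = (buf ++ [c]).reverse := by simp
          rw [List.flatMap_cons, if_neg hc, List.singleton_append]
          rw [show awsSplitSp (c :: List.flatMap (fun x => if x ∈ awsSplitChars then [' ', x, ' '] else [x]) t) buf.reverse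
                = awsSplitSp (List.flatMap (fun x => if x ∈ awsSplitChars then [' ', x, ' '] else [x]) t) ((buf ++ [c]).reverse)
              from by rw [awsSplitSp, if_neg hsp, hrev]]
          rw [ih (buf ++ [c])]
          rw [show awsTokC (c :: t) buf = awsTokC t (buf ++ [c]) from by
                simp [awsTokC, hc, hsp]]

-- B side: flushing after the fold with (out, buf) yields out ++ the token stream
def awsFlush (st : List String × List Char) : List String :=
  st.1 ++ (if st.2 ≠ [] then [String.ofList st.2] else [])

lemma aws_B_tokens :
    ∀ (s : List Char) (out : List String) (buf : List Char),
      awsFlush (s.foldl awsStepB (out, buf))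
        = out ++ (awsTokC s buf).map String.ofList := by
  intro s
  induction s with
  | nil =>
      intro out buf
      by_cases hb : buf = [] <;> simp [awsFlush, awsTokC, hb]
  | cons c t ih =>
      intro out buf
      rw [List.foldl_cons]
      by_cases hc : c ∈ awsSplitChars
      · have hmem : c ∈ awsSet := (PySem.Set.mem_ofList awsSplitChars c).mpr hc
        by_cases hb : buf = []
        · subst hb
          rw [show awsStepB (out, []) c = (out ++ [String.ofList [c]], []) from by
                simp [awsStepB, hmem]]
          rw [ih]
          simp [awsTokC, hc]
        · rw [show awsStepB (out, buf) c
                = (out ++ [String.ofList buf, String.ofList [c]], []) from by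
                simp [awsStepB, hmem, hb]]
          rw [ih]
          simp [awsTokC, hc, hb]
      · have hmem : c ∉ awsSet := fun h => hc ((PySem.Set.mem_ofList awsSplitChars c).mp h)
        by_cases hsp : c = ' '
        · subst hsp
          by_cases hb : buf = []
          · subst hb
            rw [show awsStepB (out, []) ' ' = (out, []) from by simp [awsStepB, hmem]]
            rw [ih]
            simp [awsTokC, hc]
          · rw [show awsStepB (out, buf) ' ' = (out ++ [String.ofList buf], []) from by
                  simp [awsStepB, hmem, hb]]
            rw [ih]
            simp [awsTokC, hc, hb]
        · rw [show awsStepB (out, buf) c = (out, buf ++ [c]) from by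
                simp [awsStepB, hmem, hsp]]
          rw [ih]
          rw [show awsTokC (c :: t) buf = awsTokC t (buf ++ [c]) from by
                simp [awsTokC, hc, hsp]]

-- string-level fold of A's replaces, moved to char lists
lemma aws_fold_toList :
    ∀ (cs : List Char) (s : String),
      ((cs.map (fun c => String.ofList [c])).foldl
          (fun t ch => PySem.Str.replace t ch (" " ++ ch ++ " ")) s).toList
        = cs.foldl (fun t d => PySem.Chars.replace t [d] [' ', d, ' ']) s.toList := by
  intro cs
  induction cs with
  | nil => intro s; simp
  | cons c t ih =>
      intro s
      simp only [List.map_cons, List.foldl_cons, ih]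
      congr 1
      rw [PySem.Str.toList_replace]
      simp

lemma aws_splitter_eq : awsSplitter = awsSplitChars.map (fun c => String.ofList [c]) := by
  decide

lemma aws_bne_empty (cs : List Char) : ((String.ofList cs) != "") = !decide (cs = []) := by
  have h : String.ofList cs = "" ↔ cs = [] := by
    constructor
    · intro h; have := congrArg String.toList h; simpa using this
    · intro h; simp [h]
  by_cases hc : cs = []
  · simp [hc]
  · simp [bne, beq_eq_false_iff_ne, h, hc]

-- ===== VERDICT (by name: the statement is the Claim_ definition above) =====
theorem add_whitespace_split_spec : Claim_equal_add_whitespace_split := by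
  intro text _
  unfold Spec_add_whitespace_split add_whitespace_split
  have hT :
      (awsSplitter.foldl (fun t ch => PySem.Str.replace t ch (" " ++ ch ++ " ")) text).toList
        = text.toList.flatMap (fun x => if x ∈ awsSplitChars then [' ', x, ' '] else [x]) := by
    rw [aws_splitter_eq, aws_fold_toList,
        aws_foldl_replace awsSplitChars aws_splitChars_nodup aws_space_not_splitter]
  simp only [PySem.Str.split?, PySem.Chars.split?]
  rw [show (" " : String).toList = [' '] from rfl]
  simp only [List.isEmpty_cons, Option.map_some, Option.getD_some, if_neg Bool.false_ne_true]
  rw [hT, aws_splitOn_sp, List.filter_map]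
  have hfilter :
      ((awsSplitSp (text.toList.flatMap
            (fun x => if x ∈ awsSplitChars then [' ', x, ' '] else [x])) []).filter
          ((fun u => u != "") ∘ String.ofList))
        = ((awsSplitSp (text.toList.flatMap
            (fun x => if x ∈ awsSplitChars then [' ', x, ' '] else [x])) []).filter
          (fun cs => !decide (cs = []))) := by
    apply List.filter_congr
    intro cs _
    simpa using aws_bne_empty cs
  rw [hfilter]
  have hA := aws_A_tokens text.toList []
  rw [List.reverse_nil] at hA
  rw [hA]
  have hB := aws_B_tokens text.toList [] []
  rw [show add_whitespace_split_alt text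
        = awsFlush (text.toList.foldl awsStepB ([], [])) from rfl]
  rw [hB]
  simp
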